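-- pv_equiv track=rewrite | github.com/pcdshub/pcdsdevices_notepad | config/create_recorder_file.py | create_archive
-- ===== SOURCE A (Python) =====
-- from typing import Dict, List
--
-- def create_archive(config: List[Dict[str, dict]]):
--     pvs = {}
--     for item in config:
--         for key in ('read_pv', 'write_pv'):
--             pvname = item.get(key, None)
--             if pvname is not None:
--                 pvs[pvname] = item
--
--     for pv, info in sorted(pvs.items()):
--         yield f'* {info["dotted_name"]}'
--         yield pv
-- ===== SOURCE B (Python) =====
-- from typing import Dict, List
--
--
-- def _pv_names(item):
--     out = []
--     for key in ('read_pv', 'write_pv'):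
--         pv = item.get(key)
--         if pv is not None:
--             out.append(pv)
--     return out
--
--
-- def create_archive(config: List[Dict[str, dict]]):
--     names = set()
--     for item in config:
--         names.update(_pv_names(item))
--     for pv in sorted(names):
--         info = next(item for item in reversed(config) if pv in _pv_names(item))
--         yield f'* {info["dotted_name"]}'
--         yield pv
-- ===== Notes on version B (the rewrite author's own statement) =====
-- stated objective: alternative
-- what changed: B builds no dict: it collects the set of PV names, sorts it, and for each name scans the config in reverse for the first (i.e. last-written) item carrying that name, matching the dict's last-wins semantics.
import Mathlib
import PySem

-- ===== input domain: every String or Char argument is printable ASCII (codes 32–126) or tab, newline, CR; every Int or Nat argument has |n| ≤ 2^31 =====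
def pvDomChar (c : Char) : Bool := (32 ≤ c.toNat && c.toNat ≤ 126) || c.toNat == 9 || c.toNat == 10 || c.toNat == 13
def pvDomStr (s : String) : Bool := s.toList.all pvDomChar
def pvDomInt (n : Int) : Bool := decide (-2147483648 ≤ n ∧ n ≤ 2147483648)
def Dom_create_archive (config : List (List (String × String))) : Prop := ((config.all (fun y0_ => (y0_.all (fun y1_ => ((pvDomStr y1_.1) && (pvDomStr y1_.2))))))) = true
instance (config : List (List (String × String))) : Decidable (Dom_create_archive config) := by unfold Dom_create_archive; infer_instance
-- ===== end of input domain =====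

-- B replaces A's dict-then-sort-items with a sorted set of PV names plus a reverse scan for each
-- name's last-writing item (objective: alternative decomposition, no dict built); return values only
-- (A is a generator, consumed to a list).


-- ===== PORT A =====
-- items are Python dicts str→str (assoc lists, first-match lookup); 'sorted(pvs.items())' compares
-- tuples (pv, item) but the pv components (dict keys) are distinct, so no two items are ever
-- compared — ported as a sort keyed on the first component.  'info["dotted_name"]' raises KeyError
-- when absent (excluded via Pre_ below); the port writes getD "" there.
def create_archive (config : List (List (String × String))) : List String :=
  let pvs : PySem.Dict String (List (String × String)) :=
    config.foldl (fun d item =>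
      ["read_pv", "write_pv"].foldl (fun d key =>
        match item.lookup key with
        | some pvname => d.insert pvname item
        | none => d) d) PySem.Dict.empty
  (PySem.List.sorted pvs.items (fun p => p.1) false).foldl
    (fun out p => out ++ ["* " ++ ((p.2.lookup "dotted_name").getD ""), p.1]) []

-- ===== PORT B =====
def pvNames (item : List (String × String)) : List String :=
  ["read_pv", "write_pv"].foldl (fun out key =>
    match item.lookup key with
    | some pv => out ++ [pv]
    | none => out) []

def create_archive_alt (config : List (List (String × String))) : List String :=
  let names : PySem.Set String :=
    config.foldl (fun s item => PySem.Set.update s (pvNames item)) PySem.Set.empty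
  (PySem.List.sorted names (fun pv => pv) false).foldl
    (fun out pv =>
      match config.reverse.find? (fun item => (pvNames item).contains pv) with
      | some info => out ++ ["* " ++ ((info.lookup "dotted_name").getD ""), pv]
      | none => out) []  -- unreachable: pv ∈ names; Python's next(…) would raise StopIteration

-- ===== PRECONDITION & SPEC =====
-- Pre_ excludes configs where some item carrying a 'read_pv' or 'write_pv' key lacks 'dotted_name':
-- on such configs A (and B) generally raise KeyError; on the few where a later duplicate PV still
-- lets A return, both programs return the same value anyway (see claim cites).
def Pre_create_archive (config : List (List (String × String))) : Prop :=
  ∀ item ∈ config,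
    ((item.lookup "read_pv").isSome ∨ (item.lookup "write_pv").isSome) →
      (item.lookup "dotted_name").isSome

instance (config : List (List (String × String))) : Decidable (Pre_create_archive config) := by
  unfold Pre_create_archive; infer_instance

def pvWitness_create_archive : (List (List (String × String))) :=
  [[("read_pv", "pv:1"), ("dotted_name", "dev.x")], [("write_pv", "pv:2"), ("dotted_name", "dev.y")]]

def Spec_create_archive (config : List (List (String × String))) (out : List String) : Prop := out = create_archive_alt config
instance (config : List (List (String × String))) (out : List String) : Decidable (Spec_create_archive config out) := by unfold Spec_create_archive; infer_instance

-- ===== CLAIM (what is proved, stated in full; the proofs are below) =====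
def Claim_equal_create_archive : Prop := ∀ (config : List (List (String × String))), Dom_create_archive config → Pre_create_archive config → Spec_create_archive config (create_archive config)

-- ===== LEMMAS AND PROOFS =====

-- the flat (pvname, item) stream both programs conceptually scan
def pvPairs (config : List (List (String × String))) : List (String × List (String × String)) :=
  config.flatMap (fun item => (pvNames item).map (fun pv => (pv, item)))

-- A's inner two-key loop is the insert-fold over that item's (pv, item) pairs
theorem innerA_eq (item : List (String × String)) (d : PySem.Dict String (List (String × String))) :
    ["read_pv", "write_pv"].foldl (fun d key =>
      match item.lookup key with
      | some pvname => d.insert pvname item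
      | none => d) d
    = ((pvNames item).map (fun pv => (pv, item))).foldl (fun d p => d.insert p.1 p.2) d := by
  cases h1 : item.lookup "read_pv" <;> cases h2 : item.lookup "write_pv" <;>
    simp [pvNames, List.foldl, h1, h2]

-- get? of an insert-fold is the last write: lookup in the reversed pair list, else the old dict
theorem get?_foldl_insert (l : List (String × List (String × String)))
    (d : PySem.Dict String (List (String × String))) (k : String) :
    (l.foldl (fun d p => d.insert p.1 p.2) d).get? k
      = (l.reverse.lookup k).or (d.get? k) := by
  induction l generalizing d with
  | nil => simp
  | cons p t ih =>
      simp only [List.foldl_cons, ih, List.reverse_cons, List.lookup_append]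
      rcases p with ⟨a, v⟩
      have hba : (k == a) = (decide (k = a)) := by rw [Bool.eq_iff_iff]; simp
      by_cases hk : k = a <;>
        simp [PySem.Dict.get?_insert, List.lookup_cons, hba, hk]

-- an assoc list whose values are all the same constant: lookup = membership test
theorem lookup_map_const (xs : List String) (it : List (String × String)) (pv : String) :
    (xs.map (fun p => (p, it))).lookup pv = if xs.contains pv then some it else none := by
  induction xs with
  | nil => simp
  | cons x t ih =>
      have hba : (pv == x) = (decide (pv = x)) := by rw [Bool.eq_iff_iff]; simp
      by_cases h : pv = x <;> simp [List.lookup_cons, hba, h, ih, eq_comm]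

-- lookup in the flattened pair stream = find? of the first item mentioning the pv
theorem lookup_flatMap_pairs (rl : List (List (String × String))) (g : List (String × String) → List String) (pv : String) :
    (rl.flatMap (fun it => (g it).map (fun p => (p, it)))).lookup pv
      = rl.find? (fun it => (g it).contains pv) := by
  induction rl with
  | nil => simp
  | cons it t ih =>
      simp only [List.flatMap_cons, List.lookup_append, List.find?_cons, lookup_map_const, ih]
      by_cases h : pv ∈ g it <;> simp [h]

-- items of a nodup-keys dict are determined by its keys and getD
theorem items_eq_keys_map (d : PySem.Dict String (List (String × String))) (h : d.keys.Nodup) :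
    d.items = d.keys.map (fun k => (k, d.getD k [])) := by
  have : d.keys.map (fun k => (k, d.getD k [])) = d.items.map (fun p => (p.1, d.getD p.1 [])) := by
    simp only [PySem.Dict.keys, List.map_map]; rfl
  rw [this]
  conv_lhs => rw [← List.map_id d.items]
  apply List.map_congr_left
  intro p hp
  have hv : d.getD p.1 [] = p.2 := PySem.Dict.getD_of_mem_items d (by exact hp) h []
  simp [hv]

theorem create_archive_eq (config : List (List (String × String))) :
    create_archive config = create_archive_alt config := by
  classical
  -- common data
  set pairs := pvPairs config with hpairs
  have hfsts : pairs.map Prod.fst = config.flatMap pvNames := by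
    simp [hpairs, pvPairs, List.map_flatMap, List.map_map, Function.comp_def]
  -- A's dict
  set pvs : PySem.Dict String (List (String × String)) :=
    pairs.foldl (fun d p => d.insert p.1 p.2) PySem.Dict.empty with hpvs
  have hbuild : (config.foldl (fun d item =>
      ["read_pv", "write_pv"].foldl (fun d key =>
        match item.lookup key with
        | some pvname => d.insert pvname item
        | none => d) d) PySem.Dict.empty) = pvs := by
    rw [hpvs, hpairs, pvPairs, List.foldl_flatMap]
    exact PySem.List.foldl_congr_mem _ _ _ _ (fun acc x _ => innerA_eq x acc)
  have hkeys : pvs.keys = PySem.Set.ofList (pairs.map Prod.fst) := by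
    rw [hpvs]
    rw [PySem.Dict.keys_foldl_insert_key pairs Prod.fst (fun _ p => p.2) PySem.Dict.empty]
    simp [PySem.Set.ofList_eq_foldl, PySem.Set.update, PySem.Dict.keys_empty]
  have hnodup : pvs.keys.Nodup := by
    rw [hpvs]
    exact PySem.Dict.nodup_keys_foldl_insert_key pairs Prod.fst (fun _ p => p.2) PySem.Dict.empty
      (by simp)
  have hget : ∀ k, pvs.get? k = pairs.reverse.lookup k := by
    intro k; rw [hpvs, get?_foldl_insert]; simp [PySem.Dict.get?_empty]
  -- B's name set is A's key list
  have hnames : config.foldl (fun s item => PySem.Set.update s (pvNames item)) PySem.Set.empty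
      = pvs.keys := by
    rw [hkeys, hfsts, PySem.Set.ofList_eq_foldl, List.foldl_flatMap]
    rfl
  -- the sorted distinct names
  set sk := PySem.List.sorted (PySem.Set.ofList (pairs.map Prod.fst)) (fun x => x) false with hsk
  have hskpw : sk.Pairwise (· < ·) := PySem.List.sorted_ofList_pairwise_lt _
  have hskperm : sk.Perm pvs.keys := by rw [hkeys]; exact PySem.List.sorted_perm _ _ _
  -- A's sorted items
  have hsorted : PySem.List.sorted pvs.items (fun p => p.1) false
      = sk.map (fun k => (k, pvs.getD k [])) := by
    apply PySem.List.sorted_eq_of_perm_of_pairwise_lt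
    · rw [items_eq_keys_map pvs hnodup]
      exact hskperm.map _
    · rw [List.pairwise_map]; exact hskpw
  -- B's per-name reverse find? = A's dict value
  have hfind : ∀ k ∈ sk, config.reverse.find? (fun item => (pvNames item).contains k)
      = some (pvs.getD k []) := by
    intro k hk
    have hmem : k ∈ pvs.keys := hskperm.mem_iff.mp hk
    have hsome : ∃ v, pvs.get? k = some v := by
      rcases h : pvs.get? k with _ | v
      · exact absurd ((PySem.Dict.get?_eq_none_iff_not_mem_keys pvs k).mp h) (not_not_intro hmem)
      · exact ⟨v, rfl⟩
    rcases hsome with ⟨v, hv⟩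
    have hrev : pairs.reverse.lookup k = some v := by rw [← hget, hv]
    have hflat : pairs.reverse
        = config.reverse.flatMap (fun it => ((pvNames it).reverse).map (fun p => (p, it))) := by
      rw [hpairs, pvPairs, List.reverse_flatMap]
      congr 1; funext it; simp [Function.comp, ← List.map_reverse]
    have : config.reverse.find? (fun it => ((pvNames it).reverse).contains k) = some v := by
      rw [← lookup_flatMap_pairs, ← hflat, hrev]
    have hc : (fun it => ((pvNames it).reverse.contains k)) = (fun item => (pvNames item).contains k) := by
      funext it; simp
    rw [PySem.Dict.getD_of_get?_eq_some pvs [] hv, ← hc]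
    exact this
  -- assemble
  show create_archive config = create_archive_alt config
  unfold create_archive create_archive_alt
  simp only [hbuild, hnames, hkeys, ← hsk, hsorted]
  rw [PySem.List.foldl_append_eq_flatMap
        (g := fun p : String × List (String × String) =>
          ["* " ++ ((p.2.lookup "dotted_name").getD ""), p.1]),
      List.flatMap_map]
  rw [PySem.List.foldl_congr_mem sk
        (g := fun out pv => out ++ ["* " ++ (((pvs.getD pv []).lookup "dotted_name").getD ""), pv])
        _ []
        (by intro acc x hx; rw [hfind x hx])]
  rw [PySem.List.foldl_append_eq_flatMap]

-- ===== VERDICT (by name: the statement is the Claim_ definition above) =====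
theorem create_archive_spec : Claim_equal_create_archive := by
  intro config _ _
  unfold Spec_create_archive
  exact create_archive_eq config
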